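-- pv_equiv track=rewrite | github.com/adhishyajnik/launch_school | py110/py110-119_small_problems/easy5/09/staggered_case2.py | staggered_case
-- ===== SOURCE A (Python) =====
-- def staggered_case(str_val):
--     result = ""
--     upper = True
--     for char in str_val:
--         if char.isalpha():
--             result += char.upper() if upper else char.lower()
--             upper = not upper
--         else:
--             result += char
--     return result
-- ===== SOURCE B (Python) =====
-- def staggered_case(str_val):
--     letters = [c for c in str_val if c.isalpha()]
--     transformed = [c.upper() if i % 2 == 0 else c.lower() for i, c in enumerate(letters)]
--     it = iter(transformed)
--     return "".join(next(it) if c.isalpha() else c for c in str_val)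
-- ===== Notes on version B (the rewrite author's own statement) =====
-- stated objective: alternative
-- what changed: Replaces the single stateful toggle loop by a three-stage pipeline: collect the alphabetic characters, case them by index parity in one enumerate pass, then rebuild the string by consuming them in order.
import Mathlib
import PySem

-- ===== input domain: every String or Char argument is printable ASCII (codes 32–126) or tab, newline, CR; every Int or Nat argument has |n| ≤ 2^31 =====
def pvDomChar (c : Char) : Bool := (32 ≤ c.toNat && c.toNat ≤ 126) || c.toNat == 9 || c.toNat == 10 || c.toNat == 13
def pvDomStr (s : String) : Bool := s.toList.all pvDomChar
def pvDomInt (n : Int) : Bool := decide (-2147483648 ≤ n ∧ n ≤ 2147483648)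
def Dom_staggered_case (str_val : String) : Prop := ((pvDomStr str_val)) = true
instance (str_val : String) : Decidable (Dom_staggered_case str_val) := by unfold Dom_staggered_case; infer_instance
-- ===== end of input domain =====

-- ===== PORT A =====
-- B changes the decomposition: collect letters, case them by index parity, then rebuild;
-- same cost in the Lean ports, proved equal to A's single toggle loop.
-- Port of A's loop: accumulate result and the `upper` toggle over the characters.
def pvALoop : List Char → List Char → Bool → List Char
  | [], acc, _ => acc
  | c :: cs, acc, up =>
    if PySem.Chars.isalpha c then
      pvALoop cs (acc ++ [if up then PySem.Chars.upperChar c else PySem.Chars.lowerChar c]) (!up)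
    else
      pvALoop cs (acc ++ [c]) up

def staggered_case (str_val : String) : String :=
  String.mk (pvALoop str_val.toList [] true)

-- ===== PORT B =====
-- `[c.upper() if i % 2 == 0 else c.lower() for i, c in enumerate(letters)]`
def pvTransform : Nat → List Char → List Char
  | _, [] => []
  | i, c :: cs =>
    (if i % 2 == 0 then PySem.Chars.upperChar c else PySem.Chars.lowerChar c) :: pvTransform (i + 1) cs

-- the final join: emit next transformed letter for alphabetic chars, copy others
def pvRebuild : List Char → List Char → List Char
  | [], _ => []
  | c :: cs, ts =>
    if PySem.Chars.isalpha c then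
      match ts with
      | t :: ts' => t :: pvRebuild cs ts'
      | [] => []          -- unreachable: the iterator holds one letter per alphabetic char
    else
      c :: pvRebuild cs ts

def staggered_case_alt (str_val : String) : String :=
  String.mk (pvRebuild str_val.toList
    (pvTransform 0 (str_val.toList.filter PySem.Chars.isalpha)))

-- ===== PRECONDITION & SPEC =====
def Spec_staggered_case (str_val : String) (out : String) : Prop := out = staggered_case_alt str_val
instance (str_val : String) (out : String) : Decidable (Spec_staggered_case str_val out) := by unfold Spec_staggered_case; infer_instance

-- ===== CLAIM (what is proved, stated in full; the proofs are below) =====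
def Claim_equal_staggered_case : Prop := ∀ (str_val : String), Dom_staggered_case str_val → Spec_staggered_case str_val (staggered_case str_val)

-- ===== LEMMAS AND PROOFS =====
theorem pvKey (cs : List Char) : ∀ (acc : List Char) (up : Bool) (i : Nat),
    (i % 2 == 0) = up →
    pvALoop cs acc up = acc ++ pvRebuild cs (pvTransform i (cs.filter PySem.Chars.isalpha)) := by
  induction cs with
  | nil => intro acc up i _; simp [pvALoop, pvRebuild]
  | cons c cs ih =>
    intro acc up i h
    subst h
    by_cases hc : PySem.Chars.isalpha c = true
    · have h2 : ((i + 1) % 2 == 0) = !(i % 2 == 0) := by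
        rcases Nat.mod_two_eq_zero_or_one i with h | h <;> simp [Nat.add_mod, h]
      simp only [pvALoop, hc, if_pos, List.filter_cons_of_pos hc, pvTransform, pvRebuild]
      rw [ih _ (!(i % 2 == 0)) (i + 1) h2]
      simp
    · simp only [pvALoop, hc, Bool.false_eq_true, if_false, List.filter_cons, pvRebuild]
      rw [ih _ _ i rfl]
      simp

-- ===== VERDICT (by name: the statement is the Claim_ definition above) =====
theorem staggered_case_spec : Claim_equal_staggered_case := by
  intro s _
  unfold Spec_staggered_case staggered_case staggered_case_alt
  rw [pvKey s.toList [] true 0 (by decide)]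
  simp
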